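-- pv_equiv track=rewrite | github.com/FragileTech/fragile | src/tools/fix_math_formatting.py | add_blank_line_before_display_math
-- ===== SOURCE A (Python) =====
-- def add_blank_line_before_display_math(content):
--     """
--     Ensure there's a blank line before $$ blocks.
--     Handles cases like:
--     - text\n$$ -> text\n\n$$
--     But preserves:
--     - \n\n$$ (already has blank line)
--     - start of file
--     - after block elements
--     """
--     lines = content.split("\n")
--     result_lines = []
--
--     for i, line in enumerate(lines):
--         # Check if current line starts a display math block
--         if line.strip() == "$$":
--             # Check if we need to add blank line before
--             if i > 0:
--                 prev_line = result_lines[-1] if result_lines else ""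
--                 # Don't add blank line if:
--                 # - previous line is already empty
--                 # - previous line is a block element marker
--                 # - we're in a list or indented block
--                 if prev_line.strip() != "" and not line.startswith("   "):
--                     # Add blank line
--                     result_lines.append("")
--
--         result_lines.append(line)
--
--     return "\n".join(result_lines)
-- ===== SOURCE B (Python) =====
-- def add_blank_line_before_display_math(content):
--     """Single character-level scan: never splits into a line list; streams the
--     text once, choosing the separator ("\n" or "\n\n") emitted before each line."""
--     out = []
--     buf = []
--     prev_nonblank = False
--     for ch in content + "\n":
--         if ch != "\n":
--             buf.append(ch)
--             continue
--         line = "".join(buf)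
--         buf = []
--         if out:
--             if prev_nonblank and line.strip() == "$$" and not line.startswith("   "):
--                 out.append("\n\n")
--             else:
--                 out.append("\n")
--         out.append(line)
--         prev_nonblank = line.strip() != ""
--     return "".join(out)
-- ===== Notes on version B (the rewrite author's own statement) =====
-- stated objective: alternative
-- what changed: B never splits the text into a line list: it streams the characters once (with a sentinel newline appended) through a small state machine holding a line buffer and a prev-nonblank flag, emitting a single or doubled newline separator before each completed line, instead of A's split/enumerate loop that re-reads the last element of the growing result list and rejoins at the end.
import Mathlib
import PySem

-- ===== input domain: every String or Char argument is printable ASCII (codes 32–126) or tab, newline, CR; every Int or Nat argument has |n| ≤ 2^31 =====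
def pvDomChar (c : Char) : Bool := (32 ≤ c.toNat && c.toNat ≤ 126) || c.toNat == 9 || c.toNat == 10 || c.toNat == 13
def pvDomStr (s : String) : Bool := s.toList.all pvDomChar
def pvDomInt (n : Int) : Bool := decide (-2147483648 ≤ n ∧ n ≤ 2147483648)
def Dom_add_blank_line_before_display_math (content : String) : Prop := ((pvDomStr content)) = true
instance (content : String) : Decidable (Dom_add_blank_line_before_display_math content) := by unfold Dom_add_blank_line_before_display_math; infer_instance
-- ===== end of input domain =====

-- B replaces A's split-into-lines + enumerate loop (which re-reads the last element of the
-- growing result list) by a single character-level scan of the text that emits a single or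
-- doubled newline separator before each completed line; objective: alternative decomposition.


-- ===== PORT A =====
def add_blank_line_before_display_math (content : String) : String :=
  -- content.split("\n"): sep is nonempty, so Str.split? is always `some`
  let lines := (PySem.Str.split? content "\n").getD []
  let result_lines := (PySem.List.enumerate lines).foldl
    (fun res (p : Int × String) =>
      let i := p.1
      let line := p.2
      let res :=
        if PySem.Str.strip line == "$$" then
          if i > 0 then
            let prev_line := (PySem.List.pyGet? res (-1)).getD ""
            if PySem.Str.strip prev_line != "" && !(PySem.Str.startswith line "   ") then
              res ++ [""]
            else res
          else res
        else res
      res ++ [line]) []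
  PySem.Str.join "\n" result_lines

-- ===== PORT B =====
def add_blank_line_before_display_math_alt (content : String) : String :=
  -- single pass over the characters of content + "\n"; state = (out pieces, line buffer, prev_nonblank)
  let st := (content ++ "\n").toList.foldl
    (fun (st : List String × List Char × Bool) ch =>
      if ch != '\n' then (st.1, st.2.1 ++ [ch], st.2.2)
      else
        let line := String.ofList st.2.1
        let out :=
          if st.1 != [] then
            st.1 ++ [if st.2.2 && PySem.Str.strip line == "$$" && !(PySem.Str.startswith line "   ")
                     then "\n\n" else "\n"]
          else st.1
        (out ++ [line], [], PySem.Str.strip line != ""))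
    ([], [], false)
  PySem.Str.join "" st.1

-- ===== PRECONDITION & SPEC =====
def Spec_add_blank_line_before_display_math (content : String) (out : String) : Prop := out = add_blank_line_before_display_math_alt content
instance (content : String) (out : String) : Decidable (Spec_add_blank_line_before_display_math content out) := by unfold Spec_add_blank_line_before_display_math; infer_instance

-- ===== CLAIM (what is proved, stated in full; the proofs are below) =====
def Claim_equal_add_blank_line_before_display_math : Prop := ∀ (content : String), Dom_add_blank_line_before_display_math content → Spec_add_blank_line_before_display_math content (add_blank_line_before_display_math content)

-- ===== LEMMAS AND PROOFS =====

-- proof-side names for the two loop bodies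
def pvStepA (res : List String) (p : Int × String) : List String :=
  let i := p.1
  let line := p.2
  let res :=
    if PySem.Str.strip line == "$$" then
      if i > 0 then
        let prev_line := (PySem.List.pyGet? res (-1)).getD ""
        if PySem.Str.strip prev_line != "" && !(PySem.Str.startswith line "   ") then
          res ++ [""]
        else res
      else res
    else res
  res ++ [line]

def pvStepB (st : List String × List Char × Bool) (ch : Char) : List String × List Char × Bool :=
  if ch != '\n' then (st.1, st.2.1 ++ [ch], st.2.2)
  else
    let line := String.ofList st.2.1
    let out :=
      if st.1 != [] then
        st.1 ++ [if st.2.2 && PySem.Str.strip line == "$$" && !(PySem.Str.startswith line "   ")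
                 then "\n\n" else "\n"]
      else st.1
    (out ++ [line], [], PySem.Str.strip line != "")

-- the insertion condition, in A's order
def pvCond (prev cur : String) : Bool :=
  PySem.Str.strip cur == "$$" && PySem.Str.strip prev != "" && !(PySem.Str.startswith cur "   ")

def pvChunkA (p : String × String) : List String :=
  if pvCond p.1 p.2 then ["", p.2] else [p.2]

def pvChunkB (p : String × String) : List String :=
  [if pvCond p.1 p.2 then "\n\n" else "\n", p.2]

-- line-level step of B (what pvStepB does each time it meets '\n')
def pvLineStep (st : List String × Bool) (line : String) : List String × Bool :=
  ((if st.1 != [] then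
      st.1 ++ [if st.2 && PySem.Str.strip line == "$$" && !(PySem.Str.startswith line "   ")
               then "\n\n" else "\n"]
    else st.1) ++ [line],
   PySem.Str.strip line != "")

-- structural splitter equal to python's split("\n")
def mySplit : List Char → List (List Char)
  | [] => [[]]
  | c :: cs =>
    if c = '\n' then [] :: mySplit cs
    else match mySplit cs with
      | [] => [[c]]
      | h :: t => (c :: h) :: t

def consBuf (buf : List Char) : List (List Char) → List (List Char)
  | [] => [buf]
  | h :: t => (buf ++ h) :: t

theorem mySplit_ne_nil (cs : List Char) : mySplit cs ≠ [] := by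
  cases cs with
  | nil => simp [mySplit]
  | cons c cs =>
    simp only [mySplit]
    split
    · simp
    · split <;> simp

theorem go_eq (l : List Char) : ∀ (fuel : Nat), l.length ≤ fuel → ∀ (cur : List Char) (acc : List (List Char)),
    PySem.Chars.splitOn.go ['\n'] fuel l cur acc = acc.reverse ++ consBuf cur.reverse (mySplit l) := by
  induction l with
  | nil =>
    intro fuel _ cur acc
    cases fuel <;> simp [PySem.Chars.splitOn.go, mySplit, consBuf]
  | cons c cs ih =>
    intro fuel hf cur acc
    cases fuel with
    | zero => simp at hf
    | succ f =>
      simp only [PySem.Chars.splitOn.go]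
      by_cases hc : c = '\n'
      · subst hc
        rw [if_pos (by simp [List.isPrefixOf])]
        rw [show List.drop (['\n'] : List Char).length ('\n'::cs) = cs by simp]
        rw [ih f (by simpa using hf) [] (cur.reverse :: acc)]
        simp only [mySplit, List.reverse_cons, List.append_assoc, List.reverse_nil, consBuf]
        cases h : mySplit cs with
        | nil => exact absurd h (mySplit_ne_nil cs)
        | cons a t => simp
      · rw [if_neg (by simp [List.isPrefixOf]; intro h; exact hc h.symm)]
        rw [ih f (by simpa using hf) (c :: cur) acc]
        simp only [mySplit, if_neg hc]
        cases h : mySplit cs with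
        | nil => exact absurd h (mySplit_ne_nil cs)
        | cons a t => simp [consBuf]

theorem splitOn_eq_mySplit (cs : List Char) : PySem.Chars.splitOn cs ['\n'] = mySplit cs := by
  unfold PySem.Chars.splitOn
  rw [go_eq cs (cs.length+1) (by omega) [] []]
  cases h : mySplit cs with
  | nil => exact absurd h (mySplit_ne_nil cs)
  | cons a t => simp [consBuf]

-- the line list A splits content into, over mySplit
theorem lines_eq (content : String) :
    (PySem.Str.split? content "\n").getD [] = (mySplit content.toList).map String.ofList := by
  have h := PySem.Str.split?_map content "\n"
  rw [show ("\n" : String).toList = ['\n'] from rfl] at h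
  rw [PySem.Chars.split?, if_neg (by simp)] at h
  rw [splitOn_eq_mySplit] at h
  cases hs : PySem.Str.split? content "\n" with
  | none => rw [hs] at h; simp at h
  | some l =>
    rw [hs] at h
    simp only [Option.map_some, Option.some.injEq] at h
    rw [Option.getD_some, ← h]
    simp [List.map_map, Function.comp_def]

-- A's fold = pairwise chunks
theorem ALoop (rest : List String) : ∀ (prev : String) (res : List String) (i : Int), 0 < i →
    (PySem.List.enumerate rest i).foldl pvStepA (res ++ [prev]) =
      res ++ [prev] ++ ((prev :: rest).zip rest).flatMap pvChunkA := by
  induction rest with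
  | nil => intro prev res i hi; simp [PySem.List.enumerate]
  | cons cur rest ih =>
    intro prev res i hi
    rw [PySem.List.enumerate_cons]
    simp only [List.foldl_cons, List.zip_cons_cons, List.flatMap_cons]
    have hA : pvStepA (res ++ [prev]) (i, cur) =
        (res ++ [prev] ++ (pvChunkA (prev, cur)).dropLast) ++ [cur] := by
      simp only [pvStepA, pvChunkA, pvCond, PySem.List.pyGet?_neg_one_append_singleton,
        Option.getD_some]
      by_cases h1 : PySem.Str.strip cur == "$$"
      · simp only [h1]
        simp [hi]
        split <;> simp
      · simp [h1]
    rw [hA, ih cur (res ++ [prev] ++ (pvChunkA (prev, cur)).dropLast) (i+1) (by omega)]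
    have hch : (pvChunkA (prev, cur)).dropLast ++ [cur] = pvChunkA (prev, cur) := by
      simp only [pvChunkA]
      by_cases h : pvCond prev cur <;> simp [h]
    simp only [List.append_assoc] at *
    rw [← hch]
    simp

theorem stepB_newline (out : List String) (buf : List Char) (pnb : Bool) :
    pvStepB (out, buf, pnb) '\n' =
      ((pvLineStep (out, pnb) (String.ofList buf)).1, [], (pvLineStep (out, pnb) (String.ofList buf)).2) := by
  simp only [pvStepB, pvLineStep, bne_self_eq_false, Bool.false_eq_true, if_false]

theorem stepB_other (out : List String) (buf : List Char) (pnb : Bool) (c : Char) (hc : ¬ c = '\n') :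
    pvStepB (out, buf, pnb) c = (out, buf ++ [c], pnb) := by
  simp only [pvStepB]
  rw [if_pos (by simp [bne, hc])]

-- B's char fold = line fold over the split
theorem BChar (cs : List Char) : ∀ (out : List String) (buf : List Char) (pnb : Bool),
    (cs ++ ['\n']).foldl pvStepB (out, buf, pnb) =
      (let q := ((consBuf buf (mySplit cs)).map String.ofList).foldl pvLineStep (out, pnb)
       (q.1, [], q.2)) := by
  induction cs with
  | nil =>
    intro out buf pnb
    simp only [List.nil_append, List.foldl_cons, List.foldl_nil, stepB_newline]
    simp [mySplit, consBuf]
  | cons c cs ih =>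
    intro out buf pnb
    by_cases hc : c = '\n'
    · subst hc
      simp only [List.cons_append, List.foldl_cons]
      rw [stepB_newline]
      rw [ih _ [] _]
      simp only [mySplit, consBuf]
      cases h : mySplit cs with
      | nil => exact absurd h (mySplit_ne_nil cs)
      | cons a t => simp
    · simp only [List.cons_append, List.foldl_cons]
      rw [stepB_other out buf pnb c hc]
      rw [ih _ _ _]
      simp only [mySplit, if_neg hc]
      cases h : mySplit cs with
      | nil => exact absurd h (mySplit_ne_nil cs)
      | cons a t => simp [consBuf]

-- B's line fold = pairwise chunks with separators
theorem BLine (rest : List String) : ∀ (prev : String) (out : List String), out ≠ [] →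
    (rest.foldl pvLineStep (out, PySem.Str.strip prev != "")).1 =
      out ++ ((prev :: rest).zip rest).flatMap pvChunkB := by
  induction rest with
  | nil => intro prev out _; simp
  | cons cur rest ih =>
    intro prev out hout
    simp only [List.foldl_cons, List.zip_cons_cons, List.flatMap_cons]
    have hstep : pvLineStep (out, PySem.Str.strip prev != "") cur =
        (out ++ pvChunkB (prev, cur), PySem.Str.strip cur != "") := by
      simp only [pvLineStep, pvChunkB, pvCond]
      rw [if_pos (by simpa using hout)]
      have : (PySem.Str.strip prev != "" && PySem.Str.strip cur == "$$"
                && !(PySem.Str.startswith cur "   "))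
          = (PySem.Str.strip cur == "$$" && PySem.Str.strip prev != ""
                && !(PySem.Str.startswith cur "   ")) := by
        cases (PySem.Str.strip prev != "") <;> cases (PySem.Str.strip cur == "$$") <;> simp
      rw [this]
      simp
    rw [hstep, ih cur (out ++ pvChunkB (prev, cur)) (by simp [pvChunkB])]
    simp

-- joins agree chunk by chunk: "\n".join with inserted "" lines = "".join with explicit separators
theorem intercalate_newline_cons (L : List (List Char)) : ∀ (a : List Char),
    List.intercalate ['\n'] (a :: L) = a ++ L.flatMap (fun x => '\n' :: x) := by
  induction L with
  | nil => intro a; simp [List.intercalate]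
  | cons b t ih =>
    intro a
    rw [show List.intercalate ['\n'] (a :: b :: t) = a ++ ['\n'] ++ List.intercalate ['\n'] (b :: t) by
      simp [List.intercalate, List.intersperse]]
    rw [ih b]
    simp

theorem intercalate_nil (L : List (List Char)) : List.intercalate ([] : List Char) L = L.flatten := by
  induction L with
  | nil => simp [List.intercalate]
  | cons b t ih =>
    cases t <;> simp_all [List.intercalate, List.intersperse]

theorem joinEq (pairs : List (String × String)) (l0 : String) :
    PySem.Str.join "\n" (l0 :: pairs.flatMap pvChunkA) =
      PySem.Str.join "" (l0 :: pairs.flatMap pvChunkB) := by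
  apply String.ext
  rw [PySem.Str.toList_join, PySem.Str.toList_join]
  rw [show ("\n" : String).toList = ['\n'] from rfl, show ("" : String).toList = ([] : List Char) from rfl]
  simp only [PySem.Chars.join]
  rw [intercalate_nil, List.map_cons, List.map_cons, intercalate_newline_cons]
  simp only [List.flatten_cons, List.map_flatMap, List.flatMap_assoc]
  congr 1
  rw [show (List.flatMap (fun a => List.map String.toList (pvChunkB a)) pairs).flatten
      = List.flatMap (fun a => (List.map String.toList (pvChunkB a)).flatten) pairs by
    induction pairs with
    | nil => simp
    | cons p ps ih => simp [ih]]
  apply List.flatMap_congr  -- chunkwise equality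
  intro p _
  simp only [pvChunkA, pvChunkB]
  by_cases h : pvCond p.1 p.2 <;> simp [h]

-- ===== VERDICT (by name: the statement is the Claim_ definition above) =====
theorem add_blank_line_before_display_math_spec : Claim_equal_add_blank_line_before_display_math := by
  intro content _
  show _ = _
  unfold add_blank_line_before_display_math add_blank_line_before_display_math_alt
  simp only []
  rw [show (fun (res : List String) (p : Int × String) =>
        let i := p.1
        let line := p.2
        let res :=
          if PySem.Str.strip line == "$$" then
            if i > 0 then
              let prev_line := (PySem.List.pyGet? res (-1)).getD ""
              if PySem.Str.strip prev_line != "" && !(PySem.Str.startswith line "   ") then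
                res ++ [""]
              else res
            else res
          else res
        res ++ [line]) = pvStepA from rfl]
  rw [show (fun (st : List String × List Char × Bool) ch =>
      if ch != '\n' then (st.1, st.2.1 ++ [ch], st.2.2)
      else
        let line := String.ofList st.2.1
        let out :=
          if st.1 != [] then
            st.1 ++ [if st.2.2 && PySem.Str.strip line == "$$" && !(PySem.Str.startswith line "   ")
                     then "\n\n" else "\n"]
          else st.1
        (out ++ [line], [], PySem.Str.strip line != "")) = pvStepB from rfl]
  rw [lines_eq]
  rw [show (content ++ "\n").toList = content.toList ++ ['\n'] by
    rw [String.toList_append]; rfl]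
  rw [BChar]
  cases hm : mySplit content.toList with
  | nil => exact absurd hm (mySplit_ne_nil content.toList)
  | cons m0 mrest =>
    simp only [List.map_cons, consBuf]
    -- A side: first enumerate step
    rw [PySem.List.enumerate_cons]
    simp only [List.foldl_cons]
    rw [show pvStepA [] ((0 : Int), String.ofList m0) = [] ++ [String.ofList m0] by
      simp [pvStepA]]
    rw [show ((0:Int) + 1) = 1 from rfl]
    rw [ALoop (mrest.map String.ofList) (String.ofList m0) [] 1 (by omega)]
    -- B side: first line step
    rw [show ([] ++ m0 : List Char) = m0 from by simp]
    rw [show pvLineStep ([], false) (String.ofList m0)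
        = ([String.ofList m0], PySem.Str.strip (String.ofList m0) != "") by
      simp [pvLineStep]]
    rw [BLine (mrest.map String.ofList) (String.ofList m0) ([String.ofList m0]) (by simp)]
    simp only [List.nil_append]
    exact joinEq _ _
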